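-- pv_equiv track=rewrite | github.com/christinanguyen02/Coding101 | CS 303E/HackerRank12Recursion.py | removeNegatives
-- ===== SOURCE A (Python) =====
-- def removeNegatives(lst):
--     posList = []
--     if len(lst) == 0:
--         return posList
--     else:
--         if lst[0] >= 0:
--             posList.append(lst[0])
--             return posList + removeNegatives(lst[1:])
--         else:
--             return removeNegatives(lst[1:])
-- ===== SOURCE B (Python) =====
-- def removeNegatives(lst):
--     result = []
--     for x in lst:
--         if x >= 0:
--             result.append(x)
--     return result
-- ===== Notes on version B (the rewrite author's own statement) =====
-- stated objective: faster
-- what changed: Replaces recursion over tail slices (each step copies the tail and concatenates lists, quadratic in total) by a single explicit accumulator loop over the elements.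
import Mathlib
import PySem

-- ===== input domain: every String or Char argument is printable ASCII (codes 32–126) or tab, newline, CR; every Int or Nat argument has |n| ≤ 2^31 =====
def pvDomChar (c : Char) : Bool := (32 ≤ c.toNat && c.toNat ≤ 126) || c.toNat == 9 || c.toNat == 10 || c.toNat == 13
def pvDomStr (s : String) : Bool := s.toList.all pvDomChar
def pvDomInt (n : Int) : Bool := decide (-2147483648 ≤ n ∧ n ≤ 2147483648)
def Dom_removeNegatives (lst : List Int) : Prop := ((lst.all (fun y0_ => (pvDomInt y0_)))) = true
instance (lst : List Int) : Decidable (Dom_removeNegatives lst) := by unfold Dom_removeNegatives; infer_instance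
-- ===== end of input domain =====

-- B replaces A's recursion over tail slices by one explicit accumulator loop; same return value.

-- ===== PORT A =====
-- literal port of A's recursion: empty check, head test, recurse on lst[1:]
def removeNegatives (lst : List Int) : List Int :=
  match lst with
  | [] => []
  | x :: rest =>
    if x ≥ 0 then [x] ++ removeNegatives rest
    else removeNegatives rest

-- ===== PORT B =====
-- literal port of B's loop: fold over lst appending x to the accumulator when x ≥ 0
def removeNegatives_alt (lst : List Int) : List Int :=
  lst.foldl (fun result x => if x ≥ 0 then result ++ [x] else result) []

-- ===== PRECONDITION & SPEC =====
def Spec_removeNegatives (lst : List Int) (out : List Int) : Prop := out = removeNegatives_alt lst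
instance (lst : List Int) (out : List Int) : Decidable (Spec_removeNegatives lst out) := by unfold Spec_removeNegatives; infer_instance

-- ===== CLAIM (what is proved, stated in full; the proofs are below) =====
def Claim_equal_removeNegatives : Prop := ∀ (lst : List Int), Dom_removeNegatives lst → Spec_removeNegatives lst (removeNegatives lst)

-- ===== LEMMAS AND PROOFS =====
-- loop invariant: folding from accumulator acc gives acc ++ (A's result on the rest)
theorem removeNegatives_foldl_inv (lst : List Int) (acc : List Int) :
    lst.foldl (fun result x => if x ≥ 0 then result ++ [x] else result) acc
      = acc ++ removeNegatives lst := by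
  induction lst generalizing acc with
  | nil => simp [removeNegatives]
  | cons x rest ih =>
    simp only [List.foldl, removeNegatives]
    by_cases h : x ≥ 0 <;> simp [h, ih]

-- ===== VERDICT (by name: the statement is the Claim_ definition above) =====
theorem removeNegatives_spec : Claim_equal_removeNegatives := by
  intro lst _
  unfold Spec_removeNegatives removeNegatives_alt
  simp [removeNegatives_foldl_inv]
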